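-- pv_equiv track=rewrite | github.com/AdamZhouSE/pythonHomework | Code/CodeRecords/2299/60619/275784.py | make_mid_tree
-- ===== SOURCE A (Python) =====
-- def make_mid_tree(numbers):
--     if len(numbers) == 0:
--         return "#"
--     elif len(numbers) == 1:
--         return str(numbers[0])
--     else:
--         left = []
--         right = []
--         mid = int(numbers[0])
--         for i in range(1, len(numbers)):
--             if numbers[i] > mid:
--                 right.append(numbers[i])
--             else:
--                 left.append(numbers[i])
--         return str(mid)+make_mid_tree(left) + make_mid_tree(right)
-- ===== SOURCE B (Python) =====
-- def make_mid_tree(numbers):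
--     # Iterative: explicit work stack instead of recursion; partition by two filters.
--     out = []
--     stack = [numbers]
--     while stack:
--         cur = stack.pop()
--         if not cur:
--             out.append("#")
--         elif len(cur) == 1:
--             out.append(str(cur[0]))
--         else:
--             mid = cur[0]
--             rest = cur[1:]
--             out.append(str(mid))
--             stack.append([x for x in rest if x > mid])
--             stack.append([x for x in rest if x <= mid])
--     return "".join(out)
-- ===== Notes on version B (the rewrite author's own statement) =====
-- stated objective: alternative
-- what changed: Replaces A's recursion (with an index loop appending to two lists) by an explicit work-stack loop that emits output pieces in preorder and partitions with two comprehensions; output joined once at the end.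
import Mathlib
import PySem

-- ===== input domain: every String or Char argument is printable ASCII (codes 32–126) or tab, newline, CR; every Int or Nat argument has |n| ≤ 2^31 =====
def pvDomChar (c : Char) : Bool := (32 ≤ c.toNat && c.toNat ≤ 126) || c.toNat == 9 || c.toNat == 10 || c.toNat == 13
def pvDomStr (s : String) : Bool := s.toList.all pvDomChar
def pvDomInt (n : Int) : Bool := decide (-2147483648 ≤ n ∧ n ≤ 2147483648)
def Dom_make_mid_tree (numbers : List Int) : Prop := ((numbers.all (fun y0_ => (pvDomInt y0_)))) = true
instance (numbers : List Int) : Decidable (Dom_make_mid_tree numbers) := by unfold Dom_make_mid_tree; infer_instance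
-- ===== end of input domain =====

-- B replaces A's recursion by an explicit work-stack loop emitting preorder pieces,
-- and partitions with two filters instead of an index loop; same return value (alternative, not faster).

-- ===== PORT A =====
-- A's for-loop over range(1, len) appending to `left`/`right`, as a foldl over the tail.
def pvPartStep (mid : Int) (p : List Int × List Int) (n : Int) : List Int × List Int :=
  if n > mid then (p.1, p.2 ++ [n]) else (p.1 ++ [n], p.2)

-- characterisation of the partition loop, needed by the port's termination proof
theorem pvPart_eq (mid : Int) : ∀ (rest a b : List Int),
    rest.foldl (pvPartStep mid) (a, b) =
      (a ++ rest.filter (fun n => decide (¬ mid < n)), b ++ rest.filter (fun n => decide (mid < n))) := by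
  intro rest
  induction rest with
  | nil => simp
  | cons h t ih =>
    intro a b
    simp only [List.foldl_cons, pvPartStep, List.filter_cons]
    by_cases hc : mid < h
    · simp [hc, ih]
    · simp [hc, ih]

def make_mid_tree : List Int → String
  | [] => "#"
  | [x] => PySem.Int.toStr x
  | x :: y :: rest =>
    let lr := (y :: rest).foldl (pvPartStep x) ([], [])
    PySem.Int.toStr x ++ make_mid_tree lr.1 ++ make_mid_tree lr.2
termination_by xs => xs.length
decreasing_by
  · simp only [pvPart_eq, List.nil_append]
    have := List.length_filter_le (fun n => decide (¬ x < n)) (y :: rest)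
    simp only [List.length_cons] at *
    omega
  · simp only [pvPart_eq, List.nil_append]
    have := List.length_filter_le (fun n => decide (x < n)) (y :: rest)
    simp only [List.length_cons] at *
    omega

-- ===== PORT B =====
def pvStackMeasure (stack : List (List Int)) : Nat :=
  (stack.map (fun t => 2 * t.length + 1)).sum

-- complementary filters split the list's length (termination of the stack loop)
theorem pvFilterSplitLen (m : Int) : ∀ (xs : List Int),
    (xs.filter (fun n => decide (n ≤ m))).length + (xs.filter (fun n => decide (m < n))).length = xs.length := by
  intro xs
  induction xs with
  | nil => simp
  | cons h t ih =>
    simp only [List.filter_cons]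
    by_cases hc : h ≤ m
    · have : ¬ m < h := not_lt.mpr hc
      simp [hc, this]; omega
    · have : m < h := lt_of_not_ge hc
      simp [hc, this]; omega

def pvBLoop : List (List Int) → List String → List String
  | [], out => out
  | [] :: rest, out => pvBLoop rest (out ++ ["#"])
  | [x] :: rest, out => pvBLoop rest (out ++ [PySem.Int.toStr x])
  | (x :: y :: xs) :: rest, out =>
    let l := (y :: xs).filter (fun n => decide (n ≤ x))
    let r := (y :: xs).filter (fun n => decide (x < n))
    pvBLoop (l :: r :: rest) (out ++ [PySem.Int.toStr x])
termination_by stack _ => pvStackMeasure stack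
decreasing_by
  · simp [pvStackMeasure]
  · simp [pvStackMeasure]
  · simp only [pvStackMeasure, List.map_cons, List.sum_cons, List.length_cons]
    have := pvFilterSplitLen x (y :: xs)
    simp only [List.length_cons] at this
    omega

def make_mid_tree_alt (numbers : List Int) : String :=
  String.join (pvBLoop [numbers] [])

-- ===== PRECONDITION & SPEC =====
def Spec_make_mid_tree (numbers : List Int) (out : String) : Prop := out = make_mid_tree_alt numbers
instance (numbers : List Int) (out : String) : Decidable (Spec_make_mid_tree numbers out) := by unfold Spec_make_mid_tree; infer_instance

-- ===== CLAIM (what is proved, stated in full; the proofs are below) =====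
def Claim_equal_make_mid_tree : Prop := ∀ (numbers : List Int), Dom_make_mid_tree numbers → Spec_make_mid_tree numbers (make_mid_tree numbers)

-- ===== LEMMAS AND PROOFS =====

theorem pvFoldlStr (s : String) : ∀ (l : List String) (t : String),
    s ++ List.foldl (fun r u => r ++ u) t l = List.foldl (fun r u => r ++ u) (s ++ t) l := by
  intro l
  induction l with
  | nil => simp
  | cons h tl ih => intro t; simp only [List.foldl_cons, ih, String.append_assoc]

theorem pvJoinNil : String.join ([] : List String) = "" := rfl

theorem pvJoinCons (h : String) (t : List String) : String.join (h :: t) = h ++ String.join t := by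
  simp only [String.join, List.foldl_cons, String.empty_append]
  rw [show h = h ++ "" by simp, ← pvFoldlStr]
  simp

theorem pvJoinAppend : ∀ (l1 l2 : List String), String.join (l1 ++ l2) = String.join l1 ++ String.join l2 := by
  intro l1 l2
  induction l1 with
  | nil => simp [pvJoinNil]
  | cons h t ih => simp only [List.cons_append, pvJoinCons, ih, String.append_assoc]

-- the stack loop computes the concatenation of A's serializations of the stacked lists
theorem pvBLoop_eq : ∀ (stack : List (List Int)) (out : List String),
    String.join (pvBLoop stack out) = String.join out ++ String.join (stack.map make_mid_tree) := by
  intro stack out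
  induction stack, out using pvBLoop.induct with
  | case1 out => simp [pvBLoop, pvJoinNil]
  | case2 rest out ih =>
    rw [pvBLoop, ih, pvJoinAppend]
    simp only [List.map_cons, pvJoinCons, pvJoinNil]
    rw [show make_mid_tree [] = "#" by rw [make_mid_tree]]
    simp [String.append_assoc]
  | case3 rest x out ih =>
    rw [pvBLoop, ih, pvJoinAppend]
    simp only [List.map_cons, pvJoinCons, pvJoinNil]
    rw [show make_mid_tree [rest] = PySem.Int.toStr rest by rw [make_mid_tree]]
    simp [String.append_assoc]
  | case4 x y xs rest out l r ih =>
    rw [pvBLoop]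
    simp only [l, r] at ih ⊢
    rw [ih, pvJoinAppend]
    have hA : make_mid_tree (x :: y :: xs) =
        PySem.Int.toStr x
          ++ make_mid_tree ((y :: xs).filter (fun n => decide (n ≤ x)))
          ++ make_mid_tree ((y :: xs).filter (fun n => decide (x < n))) := by
      rw [make_mid_tree]
      simp only [pvPart_eq, List.nil_append]
      have hp : (fun n => decide (¬ x < n)) = (fun n => decide (n ≤ x)) := by
        funext n; simp [not_lt]
      rw [hp]
    simp only [List.map_cons, pvJoinCons, hA]
    simp [String.append_assoc, pvJoinNil]

-- ===== VERDICT (by name: the statement is the Claim_ definition above) =====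
theorem make_mid_tree_spec : Claim_equal_make_mid_tree := by
  intro numbers _
  unfold Spec_make_mid_tree make_mid_tree_alt
  rw [pvBLoop_eq]
  simp [String.join]
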